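-- pv_equiv track=rewrite | github.com/sheela-ml/Python-Programming-Collections | Python Data Types/Python Examples/Ex-31.py | freq_per_word
-- ===== SOURCE A (Python) =====
-- def freq_per_word(words):
--     result = {}
--     for w in words:
--         d = {}
--         for ch in w:
--             d[ch] = d.get(ch, 0) + 1
--         result[w] = d
--     return result
-- ===== SOURCE B (Python) =====
-- def char_counts(chars):
--     # Quick-count recursion: peel the first character, count all its copies at
--     # once, recurse on the list with that character removed.
--     if not chars:
--         return {}
--     ch, tail = chars[0], chars[1:]
--     d = {ch: 1 + tail.count(ch)}
--     d.update(char_counts([c for c in tail if c != ch]))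
--     return d
--
-- def freq_per_word(words):
--     return {w: char_counts(list(w)) for w in dict.fromkeys(words)}
-- ===== Notes on version B (the rewrite author's own statement) =====
-- stated objective: alternative
-- what changed: Replaces A's accumulate-into-a-hash-dict nested loops by a quick-count recursion per word (peel the first character, count all its copies at once, recurse on the list with that character removed) mapped over the deduplicated word list.
import Mathlib
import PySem

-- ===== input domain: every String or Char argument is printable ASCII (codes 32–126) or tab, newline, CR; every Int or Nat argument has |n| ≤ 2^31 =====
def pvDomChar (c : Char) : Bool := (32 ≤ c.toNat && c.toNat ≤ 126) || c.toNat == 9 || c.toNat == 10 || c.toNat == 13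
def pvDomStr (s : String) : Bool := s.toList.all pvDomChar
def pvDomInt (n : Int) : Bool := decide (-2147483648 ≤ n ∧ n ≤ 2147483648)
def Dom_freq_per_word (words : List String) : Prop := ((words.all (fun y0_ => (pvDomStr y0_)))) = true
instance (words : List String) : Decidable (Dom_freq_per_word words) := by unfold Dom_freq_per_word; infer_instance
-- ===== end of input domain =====

-- B replaces A's accumulate-into-a-dict loops by a quick-count recursion per word (peel the first
-- character, count its copies, recurse on the list with it removed) over the deduped word list
-- (alternative decomposition, not faster).

-- ===== PORT A =====
def freq_per_word (words : List String) : List (String × List (String × Int)) :=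
  (words.foldl (fun result w =>
      result.insert w
        ((w.toList.map String.singleton).foldl
            (fun d ch => d.insert ch (d.getD ch 0 + 1)) PySem.Dict.empty).items)
    PySem.Dict.empty).items

-- ===== PORT B =====
-- helper char_counts of Source B
def charCounts : List String → List (String × Int)
  | [] => []
  | ch :: tail =>
      (ch, 1 + (tail.count ch : Int)) :: charCounts (tail.filter (fun c => c != ch))
termination_by l => l.length
decreasing_by
  have := List.length_filter_le (fun c => c != ch) tail
  simp; omega

def freq_per_word_alt (words : List String) : List (String × List (String × Int)) :=
  (PySem.List.dedup words).map (fun w => (w, charCounts (w.toList.map String.singleton)))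

-- ===== PRECONDITION & SPEC =====
def Spec_freq_per_word (words : List String) (out : List (String × List (String × Int))) : Prop := out = freq_per_word_alt words
instance (words : List String) (out : List (String × List (String × Int))) : Decidable (Spec_freq_per_word words out) := by unfold Spec_freq_per_word; infer_instance

-- ===== CLAIM (what is proved, stated in full; the proofs are below) =====
def Claim_equal_freq_per_word : Prop := ∀ (words : List String), Dom_freq_per_word words → Spec_freq_per_word words (freq_per_word words)

-- ===== LEMMAS AND PROOFS =====

-- A fold of Set.add can drop elements already in the accumulator.
theorem foldl_add_filter_mem {α : Type} [BEq α] [LawfulBEq α] (a : α) (l : List α)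
    (s : PySem.Set α) (ha : a ∈ s) :
    l.foldl PySem.Set.add s = (l.filter (fun x => x != a)).foldl PySem.Set.add s := by
  induction l generalizing s with
  | nil => rfl
  | cons x t ih =>
    by_cases hx : x = a
    · subst hx
      have hadd : PySem.Set.add s x = s := by
        simp [PySem.Set.add, PySem.Set.contains, ha]
      simp [hadd, ih s ha]
    · have hmem : a ∈ PySem.Set.add s x := by
        simp [PySem.Set.add]; split <;> simp [ha]
      have hxb : (x != a) = true := by simp [hx]
      simp only [List.foldl_cons, List.filter_cons, hxb]
      exact ih _ hmem

-- A fold of Set.add over elements all different from a keeps a prepended head.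
theorem foldl_add_cons {α : Type} [BEq α] [LawfulBEq α] (a : α) (l : List α)
    (hl : ∀ x ∈ l, x ≠ a) (s : PySem.Set α) :
    l.foldl PySem.Set.add (a :: s) = a :: l.foldl PySem.Set.add s := by
  induction l generalizing s with
  | nil => rfl
  | cons x t ih =>
    have hx : x ≠ a := hl x (by simp)
    have hadd : PySem.Set.add (a :: s) x = a :: PySem.Set.add s x := by
      by_cases hxs : x ∈ s
      · simp [PySem.Set.add, PySem.Set.contains, hxs, hx]
      · simp [PySem.Set.add, PySem.Set.contains, hxs, hx]
    rw [List.foldl_cons, hadd, List.foldl_cons,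
        ih (fun y hy => hl y (by simp [hy])) _]

-- dedup peels the first element and removes its copies.
theorem dedup_cons_filter {α : Type} [BEq α] [LawfulBEq α] (a : α) (l : List α) :
    PySem.List.dedup (a :: l) = a :: PySem.List.dedup (l.filter (fun x => x != a)) := by
  have h1 : PySem.List.dedup (a :: l) = l.foldl PySem.Set.add [a] := by
    simp [pysem, PySem.Set.ofList_eq_foldl, List.foldl_cons, PySem.Set.add,
      PySem.Set.contains]
  rw [h1, foldl_add_filter_mem a l [a] (by simp)]
  have h2 : ∀ x ∈ l.filter (fun x => x != a), x ≠ a := by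
    intro x hx
    have := List.of_mem_filter hx
    simpa using this
  rw [foldl_add_cons a _ h2 []]
  simp [pysem, PySem.Set.ofList_eq_foldl]

-- B's quick-count recursion computes the dedup-and-count table.
theorem charCounts_eq (l : List String) :
    charCounts l = (PySem.List.dedup l).map (fun k => (k, (l.count k : Int))) := by
  match l with
  | [] => simp [charCounts, PySem.List.dedup, PySem.Set.ofList_eq_foldl]
  | ch :: tail =>
    have ih := charCounts_eq (tail.filter (fun c => c != ch))
    rw [charCounts, ih, dedup_cons_filter]
    simp only [List.map_cons, List.count_cons_self]
    congr 1
    · push_cast; ring_nf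
    · refine List.map_congr_left ?_
      intro k hk
      have hkne : k ≠ ch := by
        rw [PySem.List.mem_dedup] at hk
        have h4 := List.of_mem_filter hk
        simpa using h4
      have hcnt : (tail.filter (fun c => c != ch)).count k = tail.count k := by
        rw [List.count_filter]
        simp [hkne]
      have hne' : ¬ch = k := fun h => hkne h.symm
      simp [hcnt, hne']
termination_by l.length
decreasing_by
  have := List.length_filter_le (fun c => c != ch) tail
  simp; omega

-- A's outer loop, whose value is a function of the key alone, appends dedup'd keys.
theorem items_foldl_insert_fun {κ ν : Type} [BEq κ] [LawfulBEq κ]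
    (f : κ → ν) (l : List κ) (s : List κ) (hs : s.Nodup) :
    (l.foldl (fun d k => d.insert k (f k))
        (PySem.Dict.mk (s.map (fun k => (k, f k))))).items
      = (l.foldl PySem.Set.add s).map (fun k => (k, f k)) := by
  induction l generalizing s with
  | nil => rfl
  | cons k t ih =>
    rw [List.foldl_cons, List.foldl_cons]
    have hcon : (PySem.Dict.mk (s.map (fun j => (j, f j)))).contains k = decide (k ∈ s) := by
      simp only [PySem.Dict.contains, List.any_map]
      rw [Bool.eq_iff_iff]
      simp [List.any_eq_true]
    by_cases hk : k ∈ s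
    · have hins : (PySem.Dict.mk (s.map (fun j => (j, f j)))).insert k (f k)
          = PySem.Dict.mk (s.map (fun j => (j, f j))) := by
        apply PySem.Dict.ext
        rw [PySem.Dict.items_insert, if_pos (by simp [hcon, hk])]
        rw [List.map_map]
        refine List.map_congr_left ?_
        intro j _
        by_cases hj : j = k <;> simp [hj]
      have hadd : PySem.Set.add s k = s := by
        simp [PySem.Set.add, PySem.Set.contains, hk]
      rw [hins, hadd, ih s hs]
    · have hins : (PySem.Dict.mk (s.map (fun j => (j, f j)))).insert k (f k)
          = PySem.Dict.mk ((s ++ [k]).map (fun j => (j, f j))) := by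
        apply PySem.Dict.ext
        rw [PySem.Dict.items_insert, if_neg (by simp [hcon, hk])]
        simp
      have hadd : PySem.Set.add s k = s ++ [k] := by
        simp [PySem.Set.add, PySem.Set.contains, hk]
      have hnd : (s ++ [k]).Nodup := by
        simp [List.nodup_append, hs]
        intro j hj hjk
        exact hk (hjk ▸ hj)
      rw [hins, hadd, ih (s ++ [k]) hnd]

-- ===== VERDICT (by name: the statement is the Claim_ definition above) =====
theorem freq_per_word_spec : Claim_equal_freq_per_word := by
  intro words _
  unfold Spec_freq_per_word freq_per_word freq_per_word_alt
  have h := items_foldl_insert_fun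
      (fun w => ((w.toList.map String.singleton).foldl
          (fun d ch => d.insert ch (d.getD ch 0 + 1))
          (PySem.Dict.empty : PySem.Dict String Int)).items)
      words [] (by simp)
  simp only [List.map_nil] at h
  have hded : words.foldl PySem.Set.add [] = PySem.List.dedup words := by
    simp [pysem, PySem.Set.ofList_eq_foldl]
  rw [hded] at h
  refine h.trans ?_
  refine List.map_congr_left ?_
  intro w _
  rw [PySem.Dict.foldl_insert_getD_add_one_eq_counter, PySem.Dict.items_counter,
      charCounts_eq]
  simp [pysem]
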